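-- pv_equiv track=rewrite | github.com/master-csmi/csmi-stages-2025 | gen2.py | namecase
-- ===== SOURCE A (Python) =====
-- def s(x, default=""):
--     """Safe string: None -> '', strip whitespace."""
--     return (str(x).strip() if x is not None else default)
--
-- def namecase(x):
--     """Simple name casing without overzealous .title()."""
--     t = s(x)
--     # Lowercase everything then capitalize tokens; preserve apostrophes/hyphens
--     out = []
--     for part in t.split():
--         tokens = []
--         for tok in part.replace("-", " - ").replace("'", " ' ").split():
--             tokens.append(tok[:1].upper() + tok[1:].lower())
--         out.append("".join(tokens).replace(" - ", "-").replace(" ' ", "'"))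
--     return " ".join(out)
-- ===== SOURCE B (Python) =====
-- def namecase(x):
--     """Simple name casing without overzealous .title()."""
--     if x is None:
--         return ""
--     parts = []
--     for part in str(x).split():
--         buf = []
--         cap = True
--         for c in part:
--             if c == "-" or c == "'":
--                 buf.append(c)
--                 cap = True
--             elif cap:
--                 buf.append(c.upper())
--                 cap = False
--             else:
--                 buf.append(c.lower())
--         parts.append("".join(buf))
--     return " ".join(parts)
-- ===== Notes on version B (the rewrite author's own statement) =====
-- stated objective: simpler
-- what changed: A capitalizes each word by padding delimiters with spaces, re-splitting, capitalizing the resulting tokens, joining and undoing the padding; B does one character scan per word with a capitalize-next flag, uppercasing after the start or a hyphen/apostrophe and lowercasing otherwise.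
import Mathlib
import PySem

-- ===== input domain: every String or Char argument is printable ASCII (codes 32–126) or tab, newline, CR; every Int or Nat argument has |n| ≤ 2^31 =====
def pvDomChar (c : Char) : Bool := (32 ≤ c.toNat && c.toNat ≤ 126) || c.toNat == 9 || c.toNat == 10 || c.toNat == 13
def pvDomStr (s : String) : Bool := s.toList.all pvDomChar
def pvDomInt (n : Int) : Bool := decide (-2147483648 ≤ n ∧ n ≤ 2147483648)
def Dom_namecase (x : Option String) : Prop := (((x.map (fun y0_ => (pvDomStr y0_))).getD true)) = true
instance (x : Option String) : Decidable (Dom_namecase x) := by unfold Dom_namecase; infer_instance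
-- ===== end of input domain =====

-- B replaces A's replace-split-capitalize-join-unreplace pipeline per word with a single
-- character-scan state machine (idiomatic/simpler); return values agree on every input.

-- ===== PORT A =====
-- s(x): None -> "", else str(x).strip()
def nc_s (x : Option String) : List Char :=
  match x with
  | none => []
  | some y => PySem.Chars.strip y.toList

-- tok[:1].upper() + tok[1:].lower()
def nc_cap (tok : List Char) : List Char :=
  PySem.Chars.upper (PySem.Chars.slice tok none (some 1)) ++
    PySem.Chars.lower (PySem.Chars.slice tok (some 1) none)

-- body of A's outer loop: per whitespace-separated part
def nc_part (part : List Char) : List Char :=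
  PySem.Chars.replace
    (PySem.Chars.replace
      (PySem.Chars.join []
        ((PySem.Chars.split₀
            (PySem.Chars.replace (PySem.Chars.replace part ['-'] [' ', '-', ' '])
              ['\''] [' ', '\'', ' '])).map nc_cap))
      [' ', '-', ' '] ['-'])
    [' ', '\'', ' '] ['\'']

def namecase (x : Option String) : String :=
  String.ofList (PySem.Chars.join [' '] ((PySem.Chars.split₀ (nc_s x)).map nc_part))

-- ===== PORT B =====
-- one pass over a word: capitalize after start / '-' / '\'', lowercase otherwise
def bc_go : List Char → Bool → List Char
  | [], _ => []
  | c :: rest, cap =>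
    if c == '-' || c == '\'' then c :: bc_go rest true
    else if cap then PySem.Chars.upperChar c :: bc_go rest false
    else PySem.Chars.lowerChar c :: bc_go rest false

def namecase_alt (x : Option String) : String :=
  match x with
  | none => ""
  | some y =>
    String.ofList
      (PySem.Chars.join [' '] ((PySem.Chars.split₀ y.toList).map (fun p => bc_go p true)))

-- ===== PRECONDITION & SPEC =====
def Spec_namecase (x : Option String) (out : String) : Prop := out = namecase_alt x
instance (x : Option String) (out : String) : Decidable (Spec_namecase x out) := by unfold Spec_namecase; infer_instance

-- ===== CLAIM (what is proved, stated in full; the proofs are below) =====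
def Claim_equal_namecase : Prop := ∀ (x : Option String), Dom_namecase x → Spec_namecase x (namecase x)

-- ===== LEMMAS AND PROOFS =====

def pvDelim (c : Char) : Bool := c == '-' || c == '\''

-- A's two delimiter replaces fused into one flatMap
def pvExpand (l : List Char) : List Char :=
  l.flatMap (fun a => if pvDelim a then [' ', a, ' '] else [a])

-- A's inner split, specialised to an expanded whitespace-free part
def pvT : List Char → List Char → List (List Char) → List (List Char)
  | [], cur, acc => if cur.isEmpty then acc.reverse else (cur.reverse :: acc).reverse
  | c :: rest, cur, acc =>
    if pvDelim c then
      pvT rest [] ([c] :: (if cur.isEmpty then acc else cur.reverse :: acc))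
    else pvT rest (c :: cur) acc

theorem replace_go_single (c : Char) (new : List Char) :
    ∀ (l : List Char) (fuel : Nat) (acc : List Char), l.length ≤ fuel →
      PySem.Chars.replace.go [c] new fuel l acc =
        acc.reverse ++ l.flatMap (fun a => if a = c then new else [a]) := by
  intro l
  induction l with
  | nil => intro fuel acc h; cases fuel <;> simp [PySem.Chars.replace.go]
  | cons a t ih =>
    intro fuel acc h
    cases fuel with
    | zero => simp at h
    | succ f =>
      simp only [PySem.Chars.replace.go]
      by_cases hc : a = c
      · subst hc
        simp only [List.isPrefixOf, BEq.rfl, Bool.true_and, if_true,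
          List.length_cons, List.length_nil, List.drop_succ_cons, List.drop_zero]
        rw [ih f _ (by simp at h; omega)]
        simp
      · have : ([c].isPrefixOf (a :: t)) = false := by
          simp [List.isPrefixOf]; exact fun hh => absurd hh.symm hc
        rw [this]
        simp only [Bool.false_eq_true, if_false]
        rw [ih f _ (by simp at h; omega)]
        simp [hc]

theorem replace_single (l : List Char) (c : Char) (new : List Char) :
    PySem.Chars.replace l [c] new = l.flatMap (fun a => if a = c then new else [a]) := by
  simp [PySem.Chars.replace, replace_go_single c new l l.length [] le_rfl]

theorem replace_go_nospace (o : List Char) (new : List Char) :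
    ∀ (fuel : Nat) (l : List Char) (acc : List Char), (∀ a ∈ l, a ≠ ' ') →
      PySem.Chars.replace.go (' ' :: o) new fuel l acc = acc.reverse ++ l := by
  intro fuel
  induction fuel with
  | zero => intro l acc h; simp [PySem.Chars.replace.go]
  | succ f ih =>
    intro l acc h
    cases l with
    | nil => simp [PySem.Chars.replace.go]
    | cons a t =>
      have ha : a ≠ ' ' := h a (by simp)
      simp only [PySem.Chars.replace.go]
      have : ((' ' :: o).isPrefixOf (a :: t)) = false := by
        simp [List.isPrefixOf]
        intro hh; exact absurd hh.symm ha
      rw [this]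
      simp only [Bool.false_eq_true, if_false]
      rw [ih t _ (fun b hb => h b (by simp [hb]))]
      simp

theorem replace_nospace (l o new : List Char) (h : ∀ a ∈ l, a ≠ ' ') :
    PySem.Chars.replace l (' ' :: o) new = l := by
  simp [PySem.Chars.replace, replace_go_nospace o new l.length l [] h]

theorem expand_eq (part : List Char) :
    PySem.Chars.replace (PySem.Chars.replace part ['-'] [' ', '-', ' ']) ['\''] [' ', '\'', ' '] =
      pvExpand part := by
  rw [replace_single, replace_single]
  induction part with
  | nil => rfl
  | cons a t ih =>
    simp only [List.flatMap_cons, List.flatMap_append, pvExpand] at ih ⊢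
    rw [ih]
    by_cases h1 : a = '-'
    · subst h1; rfl
    · by_cases h2 : a = '\''
      · subst h2; rfl
      · have hd : pvDelim a = false := by simp [pvDelim, h1, h2]
        simp [hd, h1, h2]

theorem join_nil_flatten (xs : List (List Char)) : PySem.Chars.join [] xs = xs.flatten := by
  induction xs with
  | nil => rfl
  | cons a t ih =>
    cases t with
    | nil => simp [PySem.Chars.join_singleton]
    | cons b u =>
      rw [PySem.Chars.join_cons_cons, List.flatten_cons, ← ih]
      simp

theorem split_go_expand (part : List Char) (h : ∀ a ∈ part, PySem.Chars.isspace a = false) :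
    ∀ cur acc, PySem.Chars.split₀.go (pvExpand part) cur acc = pvT part cur acc := by
  induction part with
  | nil => intro cur acc; rfl
  | cons c rest ih =>
    intro cur acc
    have hc : PySem.Chars.isspace c = false := h c (by simp)
    have hrest : ∀ a ∈ rest, PySem.Chars.isspace a = false := fun a ha => h a (by simp [ha])
    by_cases hd : pvDelim c
    · have hsp : PySem.Chars.isspace ' ' = true := by decide
      simp only [pvExpand, List.flatMap_cons, hd, if_true, pvT]
      rw [show ([' ', c, ' '] ++ List.flatMap (fun a => if pvDelim a = true then [' ', a, ' '] else [a]) rest)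
            = ' ' :: c :: ' ' :: pvExpand rest from rfl]
      simp only [PySem.Chars.split₀.go, hsp, hc, if_true, Bool.false_eq_true, if_false]
      by_cases hcur : cur.isEmpty
      · simp only [hcur, if_true, List.isEmpty_cons, Bool.false_eq_true, if_false]
        exact ih hrest [] ([c] :: acc)
      · simp only [hcur, Bool.false_eq_true, if_false, List.isEmpty_cons]
        exact ih hrest [] ([c] :: cur.reverse :: acc)
    · simp only [pvExpand, List.flatMap_cons, hd, Bool.false_eq_true, if_false, pvT,
        List.singleton_append]
      simp only [PySem.Chars.split₀.go, hc, Bool.false_eq_true, if_false]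
      exact ih hrest (c :: cur) acc

theorem cap_cons (c : Char) (t : List Char) :
    nc_cap (c :: t) = PySem.Chars.upperChar c :: t.map PySem.Chars.lowerChar := by
  simp [nc_cap, PySem.List.slice, PySem.List.clampIdx, PySem.Chars.upper, PySem.Chars.lower]

theorem cap_snoc (cur : List Char) (hcur : cur ≠ []) (c : Char) :
    nc_cap (cur.reverse ++ [c]) = nc_cap cur.reverse ++ [PySem.Chars.lowerChar c] := by
  obtain ⟨d, t, hd⟩ : ∃ d t, cur.reverse = d :: t := by
    cases hr : cur.reverse with
    | nil => exact absurd (by simpa using congrArg List.reverse hr) hcur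
    | cons d t => exact ⟨d, t, rfl⟩
  rw [hd, List.cons_append, cap_cons, cap_cons]
  simp

theorem capjoin_T (part : List Char) (h : ∀ a ∈ part, PySem.Chars.isspace a = false) :
    ∀ cur acc,
      ((pvT part cur acc).map nc_cap).flatten =
        ((acc.reverse.map nc_cap).flatten ++
          if cur.isEmpty then bc_go part true else nc_cap cur.reverse ++ bc_go part false) := by
  induction part with
  | nil =>
    intro cur acc
    by_cases hcur : cur.isEmpty
    · simp [pvT, hcur, bc_go]
    · simp [pvT, hcur, bc_go]
  | cons c rest ih =>
    intro cur acc
    have hrest : ∀ a ∈ rest, PySem.Chars.isspace a = false := fun a ha => h a (by simp [ha])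
    by_cases hd : pvDelim c
    · have hcap : nc_cap [c] = [c] := by
        rw [cap_cons]
        have : PySem.Chars.upperChar c = c := by
          rcases (by simpa [pvDelim] using hd : c = '-' ∨ c = '\'') with rfl | rfl <;> decide
        simp [this]
      simp only [pvT, hd, if_true, bc_go]
      by_cases hcur : cur.isEmpty
      · simp only [hcur, if_true]
        rw [ih hrest [] ([c] :: acc)]
        simp only [List.isEmpty_nil, if_true, List.reverse_cons, List.map_append,
          List.flatten_append, List.map_cons, List.flatten_cons, List.map_nil, List.flatten_nil,
          List.append_nil, hcap]
        have hb : (c == '-' || c == '\'') = true := by simpa [pvDelim] using hd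
        rw [hb]
        simp
      · simp only [hcur, Bool.false_eq_true, if_false]
        rw [ih hrest [] ([c] :: cur.reverse :: acc)]
        simp only [List.isEmpty_nil, if_true, List.reverse_cons, List.map_append,
          List.flatten_append, List.map_cons, List.flatten_cons, List.map_nil, List.flatten_nil,
          List.append_nil, hcap]
        have hb : (c == '-' || c == '\'') = true := by simpa [pvDelim] using hd
        rw [hb]
        simp
    · have hbc : (c == '-' || c == '\'') = false := by simpa [pvDelim] using hd
      simp only [pvT, hd, Bool.false_eq_true, if_false, bc_go, hbc]
      by_cases hcur : cur.isEmpty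
      · rw [ih hrest (c :: cur) acc]
        have : cur = [] := List.isEmpty_iff.mp hcur
        subst this
        simp only [List.isEmpty_cons, Bool.false_eq_true, if_false, List.reverse_cons,
          List.reverse_nil, List.nil_append, cap_cons, if_true, List.map_nil]
        simp
      · rw [ih hrest (c :: cur) acc]
        simp only [List.isEmpty_cons, Bool.false_eq_true, if_false, hcur, List.reverse_cons]
        rw [cap_snoc cur (by simpa [List.isEmpty_iff] using hcur) c]
        simp

theorem pv_toNat_ofNat (n : Nat) (h : n < 55296) : (Char.ofNat n).toNat = n := by
  unfold Char.ofNat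
  rw [dif_pos (by exact Or.inl (by omega) : Nat.isValidChar n)]
  simp [Char.toNat, Char.ofNatAux]

theorem upperChar_ne_space (c : Char) (h : c ≠ ' ') : PySem.Chars.upperChar c ≠ ' ' := by
  unfold PySem.Chars.upperChar
  split
  · rename_i hl
    simp only [PySem.Chars.islower, Bool.and_eq_true, decide_eq_true_eq] at hl
    have h1 : 97 ≤ c.toNat := hl.1
    have h2 : c.toNat ≤ 122 := hl.2
    intro he
    have := congrArg Char.toNat he
    rw [show (Char.ofNat (c.toNat - 32)).toNat = c.toNat - 32 from
      pv_toNat_ofNat _ (by omega)] at this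
    rw [show (' ').toNat = 32 from rfl] at this
    omega
  · exact h

theorem lowerChar_ne_space (c : Char) (h : c ≠ ' ') : PySem.Chars.lowerChar c ≠ ' ' := by
  unfold PySem.Chars.lowerChar
  split
  · rename_i hu
    simp only [PySem.Chars.isupper, Bool.and_eq_true, decide_eq_true_eq] at hu
    have h1 : 65 ≤ c.toNat := hu.1
    have h2 : c.toNat ≤ 90 := hu.2
    intro he
    have := congrArg Char.toNat he
    rw [show (Char.ofNat (c.toNat + 32)).toNat = c.toNat + 32 from
      pv_toNat_ofNat _ (by omega)] at this
    rw [show (' ').toNat = 32 from rfl] at this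
    omega
  · exact h

theorem bc_go_nospace (part : List Char) (h : ∀ a ∈ part, a ≠ ' ') :
    ∀ b, ∀ a ∈ bc_go part b, a ≠ ' ' := by
  induction part with
  | nil => intro b a ha; simp [bc_go] at ha
  | cons c rest ih =>
    intro b a ha
    have hc : c ≠ ' ' := h c (by simp)
    have hr := ih (fun x hx => h x (by simp [hx]))
    unfold bc_go at ha
    split at ha
    · rcases (by simpa using ha) with rfl | ha' <;> [exact hc; exact hr true a ha']
    · split at ha
      · rcases (by simpa using ha) with rfl | ha'
        · exact upperChar_ne_space c hc
        · exact hr false a ha'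
      · rcases (by simpa using ha) with rfl | ha'
        · exact lowerChar_ne_space c hc
        · exact hr false a ha'

theorem split_go_nospace (l : List Char) :
    ∀ (cur : List Char) (acc : List (List Char)),
      (∀ a ∈ cur, PySem.Chars.isspace a = false) →
      (∀ p ∈ acc, ∀ a ∈ p, PySem.Chars.isspace a = false) →
      ∀ p ∈ PySem.Chars.split₀.go l cur acc, ∀ a ∈ p, PySem.Chars.isspace a = false := by
  induction l with
  | nil =>
    intro cur acc hcur hacc p hp
    simp only [PySem.Chars.split₀.go] at hp
    split at hp
    · exact hacc p (by simpa using hp)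
    · rcases (by simpa using hp) with hp' | rfl
      · exact hacc p hp'
      · intro a ha; exact hcur a (by simpa using ha)
  | cons c rest ih =>
    intro cur acc hcur hacc p hp
    simp only [PySem.Chars.split₀.go] at hp
    split at hp
    · split at hp
      · exact ih [] acc (by simp) hacc p hp
      · refine ih [] (cur.reverse :: acc) (by simp) ?_ p hp
        intro q hq
        rcases (by simpa using hq : q = cur.reverse ∨ q ∈ acc) with rfl | hq'
        · intro a ha; exact hcur a (by simpa using ha)
        · exact hacc q hq'
    · rename_i hc
      refine ih (c :: cur) acc ?_ hacc p hp
      intro a ha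
      rcases (by simpa using ha : a = c ∨ a ∈ cur) with rfl | ha'
      · simpa using hc
      · exact hcur a ha'

theorem split₀_nospace (s : List Char) :
    ∀ p ∈ PySem.Chars.split₀ s, ∀ a ∈ p, PySem.Chars.isspace a = false :=
  split_go_nospace s [] [] (by simp) (by simp)

theorem split_go_ws_only (ws : List Char) (h : ∀ a ∈ ws, PySem.Chars.isspace a = true) :
    ∀ cur acc, PySem.Chars.split₀.go ws cur acc = PySem.Chars.split₀.go [] cur acc := by
  induction ws with
  | nil => intro cur acc; rfl
  | cons c rest ih =>
    intro cur acc
    have hc : PySem.Chars.isspace c = true := h c (by simp)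
    have ih' := ih (fun a ha => h a (by simp [ha]))
    simp only [PySem.Chars.split₀.go, hc, if_true]
    by_cases hcur : cur.isEmpty
    · rw [hcur]
      simp only [if_true]
      rw [ih' [] acc]
      have : cur = [] := List.isEmpty_iff.mp hcur
      subst this
      rfl
    · simp only [hcur, Bool.false_eq_true, if_false]
      rw [ih' [] (cur.reverse :: acc)]
      simp [PySem.Chars.split₀.go]

theorem split_go_append_ws (ws : List Char) (h : ∀ a ∈ ws, PySem.Chars.isspace a = true) :
    ∀ (l cur : List Char) (acc : List (List Char)),
      PySem.Chars.split₀.go (l ++ ws) cur acc = PySem.Chars.split₀.go l cur acc := by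
  intro l
  induction l with
  | nil => intro cur acc; simpa using split_go_ws_only ws h cur acc
  | cons c rest ih =>
    intro cur acc
    simp only [List.cons_append, PySem.Chars.split₀.go]
    split
    · split
      · exact ih [] acc
      · exact ih [] (cur.reverse :: acc)
    · exact ih (c :: cur) acc

theorem split_go_ws_prefix (ws : List Char) (h : ∀ a ∈ ws, PySem.Chars.isspace a = true) :
    ∀ (l : List Char) (acc : List (List Char)),
      PySem.Chars.split₀.go (ws ++ l) [] acc = PySem.Chars.split₀.go l [] acc := by
  induction ws with
  | nil => intro l acc; rfl
  | cons c rest ih =>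
    intro l acc
    have hc : PySem.Chars.isspace c = true := h c (by simp)
    simp only [List.cons_append, PySem.Chars.split₀.go, hc, if_true, List.isEmpty_nil]
    exact ih (fun a ha => h a (by simp [ha])) l acc

theorem split₀_strip (s : List Char) :
    PySem.Chars.split₀ (PySem.Chars.strip s) = PySem.Chars.split₀ s := by
  unfold PySem.Chars.split₀ PySem.Chars.strip PySem.Chars.rstrip PySem.Chars.lstrip
  have hdec : s = s.takeWhile PySem.Chars.isspace ++ s.dropWhile PySem.Chars.isspace :=
    (List.takeWhile_append_dropWhile).symm
  set t := s.dropWhile PySem.Chars.isspace with ht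
  have hdec2 : t = (t.reverse.dropWhile PySem.Chars.isspace).reverse ++
      (t.reverse.takeWhile PySem.Chars.isspace).reverse := by
    have : t.reverse = t.reverse.takeWhile PySem.Chars.isspace ++
        t.reverse.dropWhile PySem.Chars.isspace := (List.takeWhile_append_dropWhile).symm
    rw [← List.reverse_append, List.takeWhile_append_dropWhile, List.reverse_reverse]
  conv_rhs => rw [hdec, hdec2]
  rw [split_go_ws_prefix _ (fun a ha => List.mem_takeWhile_imp ha),
    split_go_append_ws _ (fun a ha => List.mem_takeWhile_imp (by simpa using ha))]

theorem part_eq (part : List Char) (h : ∀ a ∈ part, PySem.Chars.isspace a = false) :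
    nc_part part = bc_go part true := by
  unfold nc_part
  rw [expand_eq]
  unfold PySem.Chars.split₀
  rw [split_go_expand part h [] [], join_nil_flatten, capjoin_T part h [] []]
  simp only [List.isEmpty_nil, if_true, List.reverse_nil, List.map_nil, List.flatten_nil,
    List.nil_append]
  have hns : ∀ a ∈ bc_go part true, a ≠ ' ' := by
    refine bc_go_nospace part (fun a ha he => ?_) true
    rw [he] at ha
    exact absurd (h ' ' ha) (by decide)
  rw [replace_nospace _ _ _ hns, replace_nospace _ _ _ hns]

-- ===== VERDICT (by name: the statement is the Claim_ definition above) =====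
theorem namecase_spec : Claim_equal_namecase := by
  intro x _
  unfold Spec_namecase namecase namecase_alt nc_s
  cases x with
  | none => decide
  | some y =>
    rw [split₀_strip]
    congr 2
    exact List.map_congr_left (fun p hp => part_eq p (split₀_nospace _ p hp))
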